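-- pv_equiv track=rewrite | github.com/vgslavov/Problems | algomonster/least_consecutive_cards_to_match.py | least_consecutive_cards_to_match
-- ===== SOURCE A (Python) =====
-- from collections import defaultdict
-- import math
--
-- def least_consecutive_cards_to_match(cards: list[int]) -> int:
--     left = 0
--     curr_win = defaultdict(int)
--     ans = math.inf
--
--     for right in range(len(cards)):
--         curr_win[cards[right]] += 1
--
--         while curr_win[cards[right]] > 1:
--             ans = min(ans, right-left+1)
--             curr_win[cards[left]] -= 1
--             if not curr_win[cards[left]]:
--                 del curr_win[cards[left]]
--
--             left += 1
--
--     return ans if ans != math.inf else -1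
-- ===== SOURCE B (Python) =====
-- import math
--
-- def least_consecutive_cards_to_match(cards: list[int]) -> int:
--     last = {}
--     ans = math.inf
--     for i, x in enumerate(cards):
--         if x in last:
--             ans = min(ans, i - last[x] + 1)
--         last[x] = i
--     return ans if ans != math.inf else -1
-- ===== Notes on version B (the rewrite author's own statement) =====
-- stated objective: simpler
-- what changed: Replaced the sliding-window algorithm (left pointer, count dict, inner while-loop that shrinks the window and deletes emptied keys) with a single forward pass keeping only each value's last-occurrence index and taking min(ans, i - last[x] + 1) on a repeat.
import Mathlib
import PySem

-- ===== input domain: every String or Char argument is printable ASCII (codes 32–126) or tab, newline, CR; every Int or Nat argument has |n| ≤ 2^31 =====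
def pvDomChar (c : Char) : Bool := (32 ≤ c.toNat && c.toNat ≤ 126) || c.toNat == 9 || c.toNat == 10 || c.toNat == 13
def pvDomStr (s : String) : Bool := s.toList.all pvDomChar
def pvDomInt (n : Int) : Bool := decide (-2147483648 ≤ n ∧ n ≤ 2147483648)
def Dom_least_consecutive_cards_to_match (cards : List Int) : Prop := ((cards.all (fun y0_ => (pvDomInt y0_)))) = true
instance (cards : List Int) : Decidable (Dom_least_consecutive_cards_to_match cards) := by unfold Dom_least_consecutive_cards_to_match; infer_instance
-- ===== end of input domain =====

-- B replaces A's sliding window (left pointer, count dict, while-loop shrink) by one forward pass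
-- keeping only each value's last-occurrence index: simpler control flow, same results.


-- ===== PORT A =====
-- math.inf-valued `ans` is modelled as Option Int (none = inf); `min(ans, v)`:
def pvOMin (a : Option Int) (v : Int) : Option Int :=
  match a with
  | none => some v
  | some u => some (min u v)

-- the `while curr_win[cards[right]] > 1` loop; fuel = cards.length is an upper bound on its
-- iteration count (left < right stays in range, so `cards.getD left 0` is exact for cards[left])
def pvAWhile (cards : List Int) (x : Int) (right : Nat) :
    Nat → Nat → PySem.Dict Int Int → Option Int → Nat × PySem.Dict Int Int × Option Int
  | 0, left, win, ans => (left, win, ans)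
  | fuel+1, left, win, ans =>
    if win.getD x 0 > 1 then
      let ans' := pvOMin ans ((right : Int) - (left : Int) + 1)
      let cl := cards.getD left 0
      let c := win.getD cl 0 - 1
      let win' := if c = 0 then win.erase cl else win.insert cl c
      pvAWhile cards x right fuel (left+1) win' ans'
    else (left, win, ans)

-- one iteration of `for right in range(len(cards))`
def pvAStep (cards : List Int) (st : Nat × PySem.Dict Int Int × Option Int) (right : Nat) :
    Nat × PySem.Dict Int Int × Option Int :=
  let x := cards.getD right 0
  let win := st.2.1.insert x (st.2.1.getD x 0 + 1)
  pvAWhile cards x right cards.length st.1 win st.2.2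

def least_consecutive_cards_to_match (cards : List Int) : Int :=
  match ((List.range cards.length).foldl (pvAStep cards) (0, PySem.Dict.empty, none)).2.2 with
  | some v => v
  | none => -1

-- ===== PORT B =====
-- one iteration of `for i, x in enumerate(cards)` (state: last-occurrence dict, ans)
def pvBStep (st : PySem.Dict Int Int × Option Int) (p : Int × Int) :
    PySem.Dict Int Int × Option Int :=
  let ans' :=
    match st.1.get? p.2 with
    | some j => pvOMin st.2 (p.1 - j + 1)
    | none => st.2
  (st.1.insert p.2 p.1, ans')

def least_consecutive_cards_to_match_alt (cards : List Int) : Int :=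
  match ((PySem.List.enumerate cards).foldl pvBStep (PySem.Dict.empty, none)).2 with
  | some v => v
  | none => -1

-- ===== PRECONDITION & SPEC =====
def Spec_least_consecutive_cards_to_match (cards : List Int) (out : Int) : Prop := out = least_consecutive_cards_to_match_alt cards
instance (cards : List Int) (out : Int) : Decidable (Spec_least_consecutive_cards_to_match cards out) := by unfold Spec_least_consecutive_cards_to_match; infer_instance

-- ===== CLAIM (what is proved, stated in full; the proofs are below) =====
def Claim_equal_least_consecutive_cards_to_match : Prop := ∀ (cards : List Int), Dom_least_consecutive_cards_to_match cards → Spec_least_consecutive_cards_to_match cards (least_consecutive_cards_to_match cards)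

-- ===== LEMMAS AND PROOFS =====

-- index of the LAST occurrence of v in p (spec-side helper)
def lastIdx : List Int → Int → Option Nat
  | [], _ => none
  | y :: t, v =>
    match lastIdx t v with
    | some j => some (j+1)
    | none => if y = v then some 0 else none

theorem lastIdx_eq_none (p : List Int) (v : Int) (h : lastIdx p v = none) :
    ∀ k, k < p.length → p.getD k 0 ≠ v := by
  induction p generalizing v with
  | nil => simp
  | cons y t ih =>
    intro k hk
    simp only [lastIdx] at h
    cases ht : lastIdx t v with
    | some j => rw [ht] at h; simp at h
    | none =>
      rw [ht] at h
      cases k with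
      | zero =>
        simp only [List.getD_cons_zero]
        intro hy; rw [if_pos hy] at h; simp at h
      | succ k =>
        simp only [List.getD_cons_succ]
        exact ih v ht k (by simpa using hk)

theorem lastIdx_eq_some (p : List Int) (v : Int) (j : Nat) (h : lastIdx p v = some j) :
    j < p.length ∧ p.getD j 0 = v ∧ ∀ k, j < k → k < p.length → p.getD k 0 ≠ v := by
  induction p generalizing j with
  | nil => simp [lastIdx] at h
  | cons y t ih =>
    simp only [lastIdx] at h
    cases ht : lastIdx t v with
    | some j' =>
      rw [ht] at h
      have hj : j = j' + 1 := by simpa using h.symm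
      obtain ⟨h1, h2, h3⟩ := ih j' ht
      subst hj
      refine ⟨by simp; omega, by simpa using h2, ?_⟩
      intro k hk1 hk2
      cases k with
      | zero => omega
      | succ k => simpa using h3 k (by omega) (by simpa using hk2)
    | none =>
      rw [ht] at h
      by_cases hy : y = v
      · rw [if_pos hy] at h
        have hj : j = 0 := by simpa using h.symm
        subst hj
        refine ⟨by simp, by simpa using hy, ?_⟩
        intro k hk1 hk2
        cases k with
        | zero => omega
        | succ k => simpa using lastIdx_eq_none t v ht k (by simpa using hk2)
      · rw [if_neg hy] at h; simp at h

theorem lastIdx_append_self (p : List Int) (x : Int) :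
    lastIdx (p ++ [x]) x = some p.length := by
  induction p with
  | nil => simp [lastIdx]
  | cons y t ih => simp [lastIdx, ih]

theorem lastIdx_append_ne (p : List Int) (x v : Int) (h : v ≠ x) :
    lastIdx (p ++ [x]) v = lastIdx p v := by
  induction p with
  | nil => simp [lastIdx, Ne.symm h]
  | cons y t ih => simp [lastIdx, ih]

theorem pvOMin_pvOMin_of_le (a : Option Int) (v w : Int) (h : w ≤ v) :
    pvOMin (pvOMin a v) w = pvOMin a w := by
  cases a <;> simp [pvOMin] <;> omega

-- getD after erase (PySem.Dict.erase has no library lemma; proved from its definition)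
theorem pvGetD_erase (d : PySem.Dict Int Int) (k k' : Int) (v0 : Int) :
    (d.erase k).getD k' v0 = if k' = k then v0 else d.getD k' v0 := by
  obtain ⟨items⟩ := d
  simp only [PySem.Dict.erase, PySem.Dict.getD, PySem.Dict.get?]
  induction items with
  | nil => simp
  | cons hd tl ih =>
    by_cases h1 : hd.1 = k
    · rw [show List.filter (fun p => !p.1 == k) (hd :: tl) = List.filter (fun p => !p.1 == k) tl from by
          simp [h1]]
      rw [ih]
      by_cases h2 : k' = k
      · simp [h2]
      · rw [if_neg h2, if_neg h2,
          List.find?_cons_of_neg (by simp [h1]; omega)]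
    · rw [show List.filter (fun p => !p.1 == k) (hd :: tl)
            = hd :: List.filter (fun p => !p.1 == k) tl from by simp [h1]]
      by_cases h2 : hd.1 = k'
      · rw [List.find?_cons_of_pos (by simp [h2]), List.find?_cons_of_pos (by simp [h2]),
          if_neg (by omega)]
      · rw [List.find?_cons_of_neg (by simp [h2]), List.find?_cons_of_neg (by simp [h2]), ih]

-- when x is not in the current window the while loop exits immediately
theorem pvAWhile_notmem (cards : List Int) (x : Int) (r : Nat) (fuel left : Nat)
    (win : PySem.Dict Int Int) (ans : Option Int) (hf : 0 < fuel)
    (hc : ((cards.take r).drop left).count x = 0)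
    (hw : ∀ v, win.getD v 0 = (((cards.take r).drop left).count v : Int) + (if v = x then 1 else 0)) :
    pvAWhile cards x r fuel left win ans = (left, win, ans) := by
  obtain ⟨fuel, rfl⟩ := Nat.exists_eq_succ_of_ne_zero (Nat.pos_iff_ne_zero.mp hf)
  have := hw x
  rw [hc] at this
  simp only [pvAWhile]
  rw [if_neg (by omega)]

-- the while loop pops positions left..j (j = the unique in-window occurrence of x) and records r-j+1
theorem pvAWhile_spec (cards : List Int) (x : Int) (r j : Nat)
    (hjr : j < r) (hrlen : r ≤ cards.length) (hx : cards.getD j 0 = x) :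
    ∀ fuel left win ans, left ≤ j → j - left + 2 ≤ fuel →
    ((cards.take r).drop left).count x = 1 →
    (∀ v, win.getD v 0 = (((cards.take r).drop left).count v : Int) + (if v = x then 1 else 0)) →
    ∃ win', pvAWhile cards x r fuel left win ans
        = (j+1, win', pvOMin ans ((r : Int) - (j : Int) + 1))
      ∧ ∀ v, win'.getD v 0 = (((cards.take r).drop (j+1)).count v : Int) + (if v = x then 1 else 0) := by
  intro fuel
  induction fuel with
  | zero => intro left win ans h1 h2 h3 h4; omega
  | succ fuel ih =>
    intro left win ans hlj hfuel hcount hwin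
    have hlenr : (cards.take r).length = r := by simp; omega
    have hlt : left < (cards.take r).length := by omega
    have hdrop0 : (cards.take r).drop left = (cards.take r)[left] :: (cards.take r).drop (left+1) :=
      List.drop_eq_getElem_cons hlt
    have hhead : cards.getD left 0 = (cards.take r)[left] := by
      rw [List.getElem_take, List.getD_eq_getElem cards 0 (by omega)]
    have hdrop : (cards.take r).drop left = cards.getD left 0 :: (cards.take r).drop (left+1) := by
      rw [hhead]; exact hdrop0
    have hcond : win.getD x 0 > 1 := by rw [hwin x, hcount]; simp
    simp only [pvAWhile, if_pos hcond]
    by_cases hlj' : left = j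
    · -- the head of the window is the earlier occurrence of x: pop it and exit
      subst hlj'
      have hheadx : cards.getD left 0 = x := hx
      have hcount1 : ((cards.take r).drop (left+1)).count x = 0 := by
        have h := hcount; rw [hdrop, hheadx] at h; simp at h; omega
      have hc : win.getD (cards.getD left 0) 0 - 1 = 1 := by rw [hheadx, hwin x, hcount]; simp
      rw [hc, if_neg (by omega)]
      have hw' : ∀ v, ((win.insert (cards.getD left 0) 1).getD v 0)
          = (((cards.take r).drop (left+1)).count v : Int) + (if v = x then 1 else 0) := by
        intro v
        rw [hheadx, PySem.Dict.getD_insert]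
        by_cases hv : v = x
        · rw [if_pos hv, if_pos hv, hv, hcount1]; simp
        · rw [if_neg hv, if_neg hv, hwin v, if_neg hv, hdrop, hheadx]
          simp [Ne.symm hv]
      refine ⟨win.insert (cards.getD left 0) 1, ?_, hw'⟩
      rw [pvAWhile_notmem cards x r fuel (left+1) _ _ (by omega) hcount1 hw']
    · -- pop a non-x element and continue
      have hlj2 : left < j := by omega
      have hjlt : j - (left+1) < ((cards.take r).drop (left+1)).length := by
        simp [List.length_drop]; omega
      have hmem : x ∈ (cards.take r).drop (left+1) := by
        have : ((cards.take r).drop (left+1))[j - (left+1)]'hjlt = x := by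
          rw [List.getElem_drop, List.getElem_take,
            ← List.getD_eq_getElem cards 0 (by omega), show left + 1 + (j - (left+1)) = j by omega, hx]
        exact this ▸ List.getElem_mem hjlt
      have hheadne : cards.getD left 0 ≠ x := by
        intro hh
        have h := hcount
        rw [hdrop, hh] at h
        simp [List.count_cons] at h
        exact (List.count_pos_iff.mpr hmem).ne' (by omega)
      have hcount' : ((cards.take r).drop (left+1)).count x = 1 := by
        have h := hcount
        rw [hdrop, List.count_cons,
          if_neg (by simpa [List.getD] using hheadne : ¬((cards.getD left 0 == x) = true))] at h
        simpa using h
      have hcnt_head : ((cards.take r).drop left).count (cards.getD left 0)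
          = ((cards.take r).drop (left+1)).count (cards.getD left 0) + 1 := by
        rw [hdrop]; simp
      have hc : win.getD (cards.getD left 0) 0 - 1
          = (((cards.take r).drop (left+1)).count (cards.getD left 0) : Int) := by
        rw [hwin _, if_neg hheadne, hcnt_head]; push_cast; ring
      have hw' : ∀ v, ((if win.getD (cards.getD left 0) 0 - 1 = 0
              then win.erase (cards.getD left 0)
              else win.insert (cards.getD left 0) (win.getD (cards.getD left 0) 0 - 1)).getD v 0)
          = (((cards.take r).drop (left+1)).count v : Int) + (if v = x then 1 else 0) := by
        intro v
        by_cases h0 : win.getD (cards.getD left 0) 0 - 1 = 0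
        · rw [if_pos h0, pvGetD_erase]
          by_cases hv : v = cards.getD left 0
          · rw [if_pos hv, hv, if_neg hheadne]
            rw [hc] at h0
            omega
          · rw [if_neg hv, hwin v, hdrop, List.count_cons,
              if_neg (by simpa [List.getD] using Ne.symm hv : ¬((cards.getD left 0 == v) = true))]
            simp
        · rw [if_neg h0, PySem.Dict.getD_insert]
          by_cases hv : v = cards.getD left 0
          · rw [if_pos hv, hv, if_neg hheadne, hc]
            ring
          · rw [if_neg hv, hwin v, hdrop, List.count_cons,
              if_neg (by simpa [List.getD] using Ne.symm hv : ¬((cards.getD left 0 == v) = true))]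
            simp
      obtain ⟨win'', heq, hspec⟩ := ih (left+1) _ (pvOMin ans ((r : Int) - (left : Int) + 1))
        (by omega) (by omega) hcount' hw'
      refine ⟨win'', ?_, hspec⟩
      rw [heq, pvOMin_pvOMin_of_le _ _ _ (by push_cast; omega)]

-- the A-side and B-side partial states after n loop iterations
def pvAFold (cards : List Int) (n : Nat) : Nat × PySem.Dict Int Int × Option Int :=
  (List.range n).foldl (pvAStep cards) (0, PySem.Dict.empty, none)

def pvBFold (cards : List Int) (n : Nat) : PySem.Dict Int Int × Option Int :=
  ((PySem.List.enumerate cards).take n).foldl pvBStep (PySem.Dict.empty, none)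

-- an element of p at an index ≥ m lies in p.drop m
theorem pvGetD_mem_drop (p : List Int) (m k : Nat) (hm : m ≤ k) (hk : k < p.length) :
    p.getD k 0 ∈ p.drop m := by
  have h1 : k - m < (p.drop m).length := by simp [List.length_drop]; omega
  refine List.mem_iff_getElem.mpr ⟨k - m, h1, ?_⟩
  rw [List.getElem_drop, List.getD_eq_getElem p 0 hk]
  congr 1
  omega

theorem pvGetD_take (p : List Int) (r k : Nat) (hk : k < r) (hr : r ≤ p.length) :
    (p.take r).getD k 0 = p.getD k 0 := by
  rw [List.getD_eq_getElem _ 0 (by simp; omega), List.getD_eq_getElem p 0 (by omega),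
    List.getElem_take]

-- the joint loop invariant
theorem pvInv (cards : List Int) : ∀ n, n ≤ cards.length →
    (pvAFold cards n).2.2 = (pvBFold cards n).2
    ∧ (pvAFold cards n).1 ≤ n
    ∧ ((cards.take n).drop (pvAFold cards n).1).Nodup
    ∧ (∀ v, (pvAFold cards n).2.1.getD v 0 = (((cards.take n).drop (pvAFold cards n).1).count v : Int))
    ∧ (∀ v, (pvBFold cards n).1.get? v = (lastIdx (cards.take n) v).map (fun j => (j : Int)))
    ∧ (∀ pos : Nat, pos < (pvAFold cards n).1 →
        ∃ a0, (pvAFold cards n).2.2 = some a0 ∧ a0 ≤ (n : Int) - (pos : Int)) := by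
  intro n
  induction n with
  | zero =>
    intro _
    refine ⟨rfl, le_rfl, by simp [pvAFold], ?_, ?_, ?_⟩
    · intro v; simp [pvAFold, PySem.Dict.getD_empty]
    · intro v; simp [pvBFold, PySem.Dict.get?_empty, lastIdx]
    · intro pos hpos; simp [pvAFold] at hpos
  | succ n ihn =>
    intro hlen1
    have hnlt : n < cards.length := by omega
    obtain ⟨hans, hleft, hnodup, hwinv, hlast, hbound⟩ := ihn (by omega)
    have htake : (cards.take n).length = n := by simp; omega
    have hxget : cards.getD n 0 = cards[n]'hnlt := List.getD_eq_getElem cards 0 hnlt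
    have htakes : cards.take (n+1) = cards.take n ++ [cards.getD n 0] := by
      rw [List.take_succ, List.getElem?_eq_getElem hnlt, hxget]; rfl
    have hA : pvAFold cards (n+1)
        = pvAWhile cards (cards.getD n 0) n cards.length (pvAFold cards n).1
            ((pvAFold cards n).2.1.insert (cards.getD n 0)
              ((pvAFold cards n).2.1.getD (cards.getD n 0) 0 + 1)) (pvAFold cards n).2.2 := by
      unfold pvAFold
      rw [List.range_succ, List.foldl_append]
      rfl
    have henum : (PySem.List.enumerate cards)[n]? = some ((n : Int), cards.getD n 0) := by
      rw [PySem.List.getElem?_enumerate, List.getElem?_eq_getElem hnlt, hxget]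
      simp
    have hB : pvBFold cards (n+1)
        = ((pvBFold cards n).1.insert (cards.getD n 0) (n : Int),
            match (pvBFold cards n).1.get? (cards.getD n 0) with
            | some j => pvOMin (pvBFold cards n).2 ((n : Int) - j + 1)
            | none => (pvBFold cards n).2) := by
      unfold pvBFold
      rw [List.take_succ, henum]
      rw [show (some ((n : Int), cards.getD n 0)).toList = [((n : Int), cards.getD n 0)] from rfl]
      rw [List.foldl_append]
      rfl
    have hwin1 : ∀ v, (((pvAFold cards n).2.1.insert (cards.getD n 0)
            ((pvAFold cards n).2.1.getD (cards.getD n 0) 0 + 1)).getD v 0)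
        = (((cards.take n).drop (pvAFold cards n).1).count v : Int)
            + (if v = cards.getD n 0 then 1 else 0) := by
      intro v
      rw [PySem.Dict.getD_insert]
      by_cases hv : v = cards.getD n 0
      · rw [if_pos hv, if_pos hv, hv, hwinv]
      · rw [if_neg hv, if_neg hv, hwinv]; ring
    have hdrop_app : ∀ m, m ≤ n →
        (cards.take (n+1)).drop m = (cards.take n).drop m ++ [cards.getD n 0] := by
      intro m hm
      rw [htakes, List.drop_append_of_le_length (by omega)]
    have hlast' : ∀ v, (((pvBFold cards n).1.insert (cards.getD n 0) (n : Int)).get? v)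
        = (lastIdx (cards.take (n+1)) v).map (fun j => (j : Int)) := by
      intro v
      by_cases hv : v = cards.getD n 0
      · subst hv
        rw [PySem.Dict.get?_insert_self, htakes, lastIdx_append_self, htake]
        rfl
      · rw [PySem.Dict.get?_insert_of_ne _ _ hv, hlast v, htakes, lastIdx_append_ne _ _ _ hv]
    by_cases hc : ((cards.take n).drop (pvAFold cards n).1).count (cards.getD n 0) = 0
    · -- x is not in the current window: A's while loop is a no-op, B's candidate (if any) is stale
      have hAeq : pvAFold cards (n+1)
          = ((pvAFold cards n).1,
              (pvAFold cards n).2.1.insert (cards.getD n 0)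
                ((pvAFold cards n).2.1.getD (cards.getD n 0) 0 + 1),
              (pvAFold cards n).2.2) := by
        rw [hA, pvAWhile_notmem cards (cards.getD n 0) n cards.length _ _ _ (by omega) hc hwin1]
      have hBans : (pvBFold cards (n+1)).2 = (pvBFold cards n).2 := by
        rw [hB]
        cases hli : lastIdx (cards.take n) (cards.getD n 0) with
        | none => rw [hlast _, hli]; simp
        | some j' =>
          rw [hlast _, hli]
          simp only [Option.bind_some, Option.bind_eq_bind]
          obtain ⟨hj1, hj2, hj3⟩ := lastIdx_eq_some _ _ _ hli
          rw [htake] at hj1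
          -- j' is an occurrence of x strictly before the window
          have hjl : j' < (pvAFold cards n).1 := by
            by_contra hge
            push_neg at hge
            have hmem : cards.getD n 0 ∈ (cards.take n).drop (pvAFold cards n).1 :=
              hj2 ▸ pvGetD_mem_drop (cards.take n) _ j' hge (by rw [htake]; omega)
            exact (List.count_pos_iff.mpr hmem).ne' hc
          obtain ⟨a0, ha0, hle0⟩ := hbound j' hjl
          have hb0 : (pvBFold cards n).2 = some a0 := hans.symm.trans ha0
          rw [hb0]
          simp only [Option.pure_def, Option.map_some, pvOMin]
          rw [min_eq_left (by omega)]
      refine ⟨?_, by rw [hAeq]; omega, ?_, ?_, ?_, ?_⟩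
      · rw [hAeq, hBans, hans]
      · rw [hAeq, hdrop_app _ hleft]
        simp only [List.nodup_append, List.nodup_cons]
        refine ⟨hnodup, by simp, ?_⟩
        intro y hy
        simp only [List.mem_singleton, forall_eq]
        rintro rfl
        exact (List.count_pos_iff.mpr hy).ne' hc
      · intro v
        rw [hAeq, hdrop_app _ hleft, List.count_append]
        rw [show ([cards.getD n 0].count v) = if v = cards.getD n 0 then 1 else 0 by
              by_cases hv : v = cards.getD n 0
              · simp [hv, List.count_singleton]
              · rw [List.count_singleton, if_neg (by simpa [List.getD] using Ne.symm hv), if_neg hv]]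
        push_cast
        rw [hwin1 v]
      · intro v
        rw [hB]
        exact hlast' v
      · intro pos hpos
        rw [hAeq] at hpos ⊢
        obtain ⟨a0, ha0, hle0⟩ := hbound pos hpos
        exact ⟨a0, ha0, by push_cast at hle0 ⊢; omega⟩
    · -- x occurs (exactly once) in the window, at absolute index j = lastIdx
      have hmem : cards.getD n 0 ∈ (cards.take n).drop (pvAFold cards n).1 :=
        List.count_pos_iff.mp (by omega)
      have hcount1 : ((cards.take n).drop (pvAFold cards n).1).count (cards.getD n 0) = 1 :=
        List.count_eq_one_of_mem hnodup hmem
      obtain ⟨m, hm, hmx⟩ := List.getElem_of_mem hmem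
      have hmlen : (pvAFold cards n).1 + m < n := by
        have := hm; simp [htake] at this; omega
      -- lastIdx of x in the prefix exists
      cases hli : lastIdx (cards.take n) (cards.getD n 0) with
      | none =>
        exfalso
        refine lastIdx_eq_none _ _ hli ((pvAFold cards n).1 + m) (by rw [htake]; omega) ?_
        rw [List.getD_eq_getElem (cards.take n) 0 (by rw [htake]; omega), ← hmx,
          List.getElem_drop]
      | some j =>
        obtain ⟨hj1, hj2, hj3⟩ := lastIdx_eq_some _ _ _ hli
        rw [htake] at hj1
        have hlj : (pvAFold cards n).1 ≤ j := by
          by_contra hge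
          push_neg at hge
          refine hj3 ((pvAFold cards n).1 + m) (by omega) (by rw [htake]; omega) ?_
          rw [List.getD_eq_getElem (cards.take n) 0 (by rw [htake]; omega), ← hmx,
            List.getElem_drop]
        have hxj : cards.getD j 0 = cards.getD n 0 := by
          rw [← pvGetD_take cards n j hj1 (by omega)]
          exact hj2
        obtain ⟨win', heq, hspec⟩ := pvAWhile_spec cards (cards.getD n 0) n j hj1 (by omega) hxj
          cards.length (pvAFold cards n).1
          ((pvAFold cards n).2.1.insert (cards.getD n 0)
            ((pvAFold cards n).2.1.getD (cards.getD n 0) 0 + 1))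
          (pvAFold cards n).2.2 hlj (by omega) hcount1 hwin1
        have hAeq : pvAFold cards (n+1)
            = (j+1, win', pvOMin (pvAFold cards n).2.2 ((n : Int) - (j : Int) + 1)) := by
          rw [hA, heq]
        have hBans : (pvBFold cards (n+1)).2
            = pvOMin (pvBFold cards n).2 ((n : Int) - (j : Int) + 1) := by
          rw [hB, hlast _, hli]
          simp
        -- the old window minus its first j+1-left elements, i.e. positions j+1..n-1, has no x
        have hsplit : ((cards.take n).drop (j+1)).count (cards.getD n 0) = 0 := by
          rw [List.count_eq_zero]
          intro hmem2
          obtain ⟨k, hk, hkx⟩ := List.getElem_of_mem hmem2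
          have hkn : j + 1 + k < n := by
            simp [List.length_drop, htake] at hk; omega
          refine hj3 (j+1+k) (by omega) (by rw [htake]; omega) ?_
          rw [List.getD_eq_getElem (cards.take n) 0 (by rw [htake]; omega), ← hkx,
            List.getElem_drop]
        refine ⟨?_, by rw [hAeq]; simp; omega, ?_, ?_, ?_, ?_⟩
        · rw [hAeq, hBans, hans]
        · rw [hAeq, hdrop_app _ (by omega)]
          simp only [List.nodup_append, List.nodup_cons]
          refine ⟨?_, by simp, ?_⟩
          · have : (cards.take n).drop (j+1)
                = ((cards.take n).drop (pvAFold cards n).1).drop (j+1-(pvAFold cards n).1) := by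
              rw [List.drop_drop, show (pvAFold cards n).1 + (j+1-(pvAFold cards n).1) = j+1 by omega]

            rw [this]
            exact hnodup.sublist (List.drop_sublist _ _)
          · intro y hy
            simp only [List.mem_singleton, forall_eq]
            rintro rfl
            exact (List.count_pos_iff.mpr hy).ne' hsplit
        · intro v
          have hsing : ([cards.getD n 0].count v) = if v = cards.getD n 0 then 1 else 0 := by
            by_cases hv : v = cards.getD n 0
            · simp [hv, List.count_singleton]
            · rw [List.count_singleton, if_neg (by simpa [List.getD] using Ne.symm hv), if_neg hv]
          rw [hAeq, hdrop_app _ (by omega), List.count_append, hsing]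
          push_cast
          rw [hspec v]
        · intro v
          rw [hB]
          exact hlast' v
        · intro pos hpos
          rw [hAeq] at hpos ⊢
          simp only at hpos ⊢
          refine ⟨?_, ?_, ?_⟩
          case _ => exact (match (pvAFold cards n).2.2 with
            | none => ((n : Int) - (j : Int) + 1)
            | some a0 => min a0 ((n : Int) - (j : Int) + 1))
          · cases (pvAFold cards n).2.2 <;> rfl
          · have hjn : ((n : Int) - (j : Int) + 1) ≤ ((n:Int) + 1) - (pos : Int) := by
              push_cast; omega
            cases (pvAFold cards n).2.2 with
            | none => simpa using hjn
            | some a0 =>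
              simp only
              calc min a0 ((n : Int) - (j : Int) + 1) ≤ (n : Int) - (j : Int) + 1 := min_le_right _ _
                _ ≤ _ := by push_cast; omega

-- ===== VERDICT (by name: the statement is the Claim_ definition above) =====
theorem least_consecutive_cards_to_match_spec : Claim_equal_least_consecutive_cards_to_match := by
  intro cards _
  unfold Spec_least_consecutive_cards_to_match
  have h := (pvInv cards cards.length le_rfl).1
  unfold least_consecutive_cards_to_match least_consecutive_cards_to_match_alt
  rw [show (PySem.List.enumerate cards) = (PySem.List.enumerate cards).take cards.length by
        rw [List.take_of_length_le]; rw [PySem.List.length_enumerate]]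
  rw [← pvAFold, ← pvBFold, h]
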